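-- pv_equiv track=rewrite | github.com/junehawk/BIKO-GenomeBoard | scripts/intake/parse_annotation.py | parse_ann_value
-- ===== SOURCE A (Python) =====
-- from typing import Dict, List, Optional
--
-- def _pick_best_transcript(entries: List[Dict[str, str]], gene: Optional[str] = None) -> Optional[Dict[str, str]]:
--     """Pick the best annotation entry — prefer MANE/canonical, matching gene, highest impact."""
--     if not entries:
--         return None
--
--     # Filter by gene if specified
--     if gene:
--         gene_matches = [e for e in entries if e.get("gene", "").upper() == gene.upper()]
--         if gene_matches:
--             entries = gene_matches
--
--     # Prefer entries with MANE_SELECT or CANONICAL=YES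
--     for e in entries:
--         if e.get("mane_select") or e.get("canonical") == "YES":
--             return e
--
--     # Sort by impact: HIGH > MODERATE > LOW > MODIFIER
--     impact_order = {"HIGH": 0, "MODERATE": 1, "LOW": 2, "MODIFIER": 3}
--     entries = sorted(entries, key=lambda e: impact_order.get(e.get("impact", "MODIFIER"), 3))
--
--     return entries[0]
--
-- def parse_ann_value(ann_string: str, fields: List[str], gene: Optional[str] = None) -> Optional[Dict[str, str]]:
--     """Parse a SnpEff ANN INFO value into annotation dict."""
--     entries = []
--     for entry_str in ann_string.split(","):
--         values = entry_str.split("|")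
--         entry = {}
--         for i, val in enumerate(values):
--             if i < len(fields):
--                 entry[fields[i].lower()] = val.strip()
--         mapped = {
--             "gene": entry.get("gene_name", ""),
--             "consequence": entry.get("annotation", ""),
--             "impact": entry.get("annotation_impact", ""),
--             "transcript": entry.get("feature_id", ""),
--             "hgvsc": entry.get("hgvs.c", ""),
--             "hgvsp": entry.get("hgvs.p", ""),
--             "sift": "",
--             "polyphen": "",
--         }
--         entries.append(mapped)
--
--     return _pick_best_transcript(entries, gene)
-- ===== SOURCE B (Python) =====
-- from typing import List, Optional, Dict
--
-- def parse_ann_value(ann_string: str, fields: List[str], gene: Optional[str] = None) -> Optional[Dict[str, str]]: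
--     """Single-pass: build each entry from a (lowered-field, stripped-value) pair list
--     and keep the entry with the smallest (gene-mismatch, impact-rank) key, earliest wins."""
--     low_fields = [f.lower() for f in fields]
--     target = gene.upper() if gene else None
--     best = None
--     best_key = None
--     for entry_str in ann_string.split(","):
--         pairs = list(zip(low_fields, (v.strip() for v in entry_str.split("|"))))
--
--         def lookup(name):
--             result = ""
--             for k, v in pairs:
--                 if k == name:
--                     result = v
--             return result
--
--         gene_val = lookup("gene_name")
--         impact = lookup("annotation_impact")
--         rank = 0 if impact == "HIGH" else 1 if impact == "MODERATE" else 2 if impact == "LOW" else 3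
--         key = (0 if target is None or gene_val.upper() == target else 1, rank)
--         if best_key is None or key < best_key:
--             best_key = key
--             best = {
--                 "gene": gene_val,
--                 "consequence": lookup("annotation"),
--                 "impact": impact,
--                 "transcript": lookup("feature_id"),
--                 "hgvsc": lookup("hgvs.c"),
--                 "hgvsp": lookup("hgvs.p"),
--                 "sift": "",
--                 "polyphen": "",
--             }
--     return best
-- ===== Notes on version B (the rewrite author's own statement) =====
-- stated objective: alternative
-- what changed: A builds a per-entry dict via enumerate+insert and selects by gene-filtering with fallback, a (dead) MANE/canonical scan, and a stable sort by impact taking element 0; B makes one left-to-right pass that builds each entry from a zipped (lowered-field, stripped-value) pair list and keeps the entry with the smallest (gene-mismatch, impact-rank) lexicographic key, earliest wins.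
import Mathlib
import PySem

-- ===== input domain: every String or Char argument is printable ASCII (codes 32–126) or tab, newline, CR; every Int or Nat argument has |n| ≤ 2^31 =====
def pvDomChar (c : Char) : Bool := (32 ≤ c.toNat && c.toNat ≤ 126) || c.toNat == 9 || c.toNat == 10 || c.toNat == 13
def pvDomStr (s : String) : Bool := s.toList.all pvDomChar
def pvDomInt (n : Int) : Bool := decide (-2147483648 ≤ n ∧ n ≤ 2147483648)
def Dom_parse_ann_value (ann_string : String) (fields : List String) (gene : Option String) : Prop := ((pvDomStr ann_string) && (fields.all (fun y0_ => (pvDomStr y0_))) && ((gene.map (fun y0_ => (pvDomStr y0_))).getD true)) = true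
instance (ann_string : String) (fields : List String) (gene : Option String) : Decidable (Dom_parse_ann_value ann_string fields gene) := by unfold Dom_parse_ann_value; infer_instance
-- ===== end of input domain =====

-- B replaces A's filter + dead MANE scan + stable sort cascade by one left-to-right pass keeping the
-- entry with the smallest (gene-mismatch, impact-rank) key (objective: alternative single-pass selection).

-- ===== PORT A =====

-- str.split(sep) with the literal nonempty separators "," / "|": split? is some there, exact
def pvSplit (s sep : String) : List String := (PySem.Str.split? s sep).getD []

-- Python dict.get(k) / dict.get(k, dflt) on A's `mapped` dict, whose keys are 8 distinct literals:
-- as an association list the first (only) match is exact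
def pvAGet? (e : List (String × String)) (k : String) : Option String :=
  (e.find? (fun p => p.1 == k)).map Prod.snd

def pvAGetD (e : List (String × String)) (k dflt : String) : String :=
  ((e.find? (fun p => p.1 == k)).map Prod.snd).getD dflt

def pvImpactOrder : PySem.Dict String Int :=
  PySem.Dict.ofList [("HIGH", 0), ("MODERATE", 1), ("LOW", 2), ("MODIFIER", 3)]

-- entry = {}; for i, val in enumerate(values): if i < len(fields): entry[fields[i].lower()] = val.strip()
-- (inside the guard 0 ≤ i < len(fields), so pyGetD is the exact fields[i])
def pvEntryDictA (fields : List String) (entry_str : String) : PySem.Dict String String :=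
  let values := pvSplit entry_str "|"
  (PySem.List.enumerate values 0).foldl
    (fun d iv =>
      if iv.1 < (fields.length : Int) then
        d.insert (PySem.Str.lower (PySem.List.pyGetD fields iv.1 "")) (PySem.Str.strip iv.2)
      else d)
    PySem.Dict.empty

def pvMappedA (fields : List String) (entry_str : String) : List (String × String) :=
  let entry := pvEntryDictA fields entry_str
  [("gene", entry.getD "gene_name" ""), ("consequence", entry.getD "annotation" ""),
   ("impact", entry.getD "annotation_impact" ""), ("transcript", entry.getD "feature_id" ""),
   ("hgvsc", entry.getD "hgvs.c" ""), ("hgvsp", entry.getD "hgvs.p" ""),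
   ("sift", ""), ("polyphen", "")]

-- _pick_best_transcript; entries[0] on the guaranteed-nonempty sorted list is its head?
def pvPickBestA (entries : List (List (String × String))) (gene : Option String) :
    Option (List (String × String)) :=
  if entries = [] then none
  else
    let g := gene.getD ""
    let entries1 :=
      if g = "" then entries
      else
        let gene_matches := entries.filter (fun e => PySem.Str.upper (pvAGetD e "gene" "") == PySem.Str.upper g)
        if gene_matches = [] then entries else gene_matches
    match entries1.find? (fun e =>
        ((pvAGet? e "mane_select").getD "" != "") || (pvAGet? e "canonical" == some "YES")) with
    | some e => some e
    | none =>
      (PySem.List.sorted entries1 (fun e => pvImpactOrder.getD (pvAGetD e "impact" "MODIFIER") 3)).head?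

def parse_ann_value (ann_string : String) (fields : List String) (gene : Option String) :
    Option (List (String × String)) :=
  let entries := (pvSplit ann_string ",").foldl (fun acc s => acc ++ [pvMappedA fields s]) []
  pvPickBestA entries gene

-- ===== PORT B =====

-- pairs = list(zip(low_fields, (v.strip() for v in entry_str.split("|"))))
def pvPairsB (lowFields : List String) (entry_str : String) : List (String × String) :=
  lowFields.zip ((pvSplit entry_str "|").map PySem.Str.strip)

-- forward scan keeping the last match, "" if none
def pvLookupB (pairs : List (String × String)) (name : String) : String :=
  pairs.foldl (fun r p => if p.1 == name then p.2 else r) ""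

def pvRank (impact : String) : Int :=
  if impact == "HIGH" then 0 else if impact == "MODERATE" then 1
  else if impact == "LOW" then 2 else 3

-- Python tuple < on (Int, Int), lexicographic
def pvKeyLt (a b : Int × Int) : Bool := a.1 < b.1 || (a.1 == b.1 && a.2 < b.2)

def pvKeyB (lowFields : List String) (target : Option String) (entry_str : String) : Int × Int :=
  ((match target with
    | none => 0
    | some t => if PySem.Str.upper (pvLookupB (pvPairsB lowFields entry_str) "gene_name") == t then 0 else 1),
   pvRank (pvLookupB (pvPairsB lowFields entry_str) "annotation_impact"))

def pvMappedB (lowFields : List String) (entry_str : String) : List (String × String) :=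
  let pairs := pvPairsB lowFields entry_str
  [("gene", pvLookupB pairs "gene_name"), ("consequence", pvLookupB pairs "annotation"),
   ("impact", pvLookupB pairs "annotation_impact"), ("transcript", pvLookupB pairs "feature_id"),
   ("hgvsc", pvLookupB pairs "hgvs.c"), ("hgvsp", pvLookupB pairs "hgvs.p"),
   ("sift", ""), ("polyphen", "")]

def pvStepB (lowFields : List String) (target : Option String)
    (best : Option ((Int × Int) × List (String × String))) (entry_str : String) :
    Option ((Int × Int) × List (String × String)) :=
  match best with
  | none => some (pvKeyB lowFields target entry_str, pvMappedB lowFields entry_str)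
  | some b =>
    if pvKeyLt (pvKeyB lowFields target entry_str) b.1 then
      some (pvKeyB lowFields target entry_str, pvMappedB lowFields entry_str)
    else some b

def parse_ann_value_alt (ann_string : String) (fields : List String) (gene : Option String) :
    Option (List (String × String)) :=
  let lowFields := fields.map PySem.Str.lower
  let target : Option String :=
    if gene.getD "" = "" then none else some (PySem.Str.upper (gene.getD ""))
  ((pvSplit ann_string ",").foldl (pvStepB lowFields target) none).map Prod.snd

-- ===== PRECONDITION & SPEC =====
def Spec_parse_ann_value (ann_string : String) (fields : List String) (gene : Option String) (out : Option (List (String × String))) : Prop := out = parse_ann_value_alt ann_string fields gene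
instance (ann_string : String) (fields : List String) (gene : Option String) (out : Option (List (String × String))) : Decidable (Spec_parse_ann_value ann_string fields gene out) := by unfold Spec_parse_ann_value; infer_instance

-- ===== CLAIM (what is proved, stated in full; the proofs are below) =====
def Claim_equal_parse_ann_value : Prop := ∀ (ann_string : String) (fields : List String) (gene : Option String), Dom_parse_ann_value ann_string fields gene → Spec_parse_ann_value ann_string fields gene (parse_ann_value ann_string fields gene)

-- ===== LEMMAS AND PROOFS =====


def pvFmin {α : Type} (k : α → Int) (xs : List α) : Option α :=
  xs.foldl (fun b x => match b with
    | none => some x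
    | some y => if k x < k y then some x else some y) none

def pvSelW {α : Type} (key : α → Int × Int) (xs : List α) : Option α :=
  xs.foldl (fun b x => match b with
    | none => some x
    | some y => if pvKeyLt (key x) (key y) then some x else some y) none

theorem pvFmin_append {α : Type} (k : α → Int) (xs : List α) (x : α) :
    pvFmin k (xs ++ [x]) = (match pvFmin k xs with
      | none => some x
      | some y => if k x < k y then some x else some y) := by
  simp [pvFmin, List.foldl_append]

theorem pvSelW_append {α : Type} (key : α → Int × Int) (xs : List α) (x : α) :
    pvSelW key (xs ++ [x]) = (match pvSelW key xs with
      | none => some x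
      | some y => if pvKeyLt (key x) (key y) then some x else some y) := by
  simp [pvSelW, List.foldl_append]

theorem pvFmin_eq_none_iff {α : Type} (k : α → Int) (xs : List α) :
    pvFmin k xs = none ↔ xs = [] := by
  induction xs using List.reverseRecOn with
  | nil => simp [pvFmin]
  | append_singleton xs x ih =>
    rw [pvFmin_append]
    constructor
    · intro h
      cases hm : pvFmin k xs <;> rw [hm] at h <;> simp at h
      split at h <;> simp at h
    · intro h; simp at h

theorem pvFmin_mem {α : Type} (k : α → Int) (xs : List α) {y : α}
    (h : pvFmin k xs = some y) : y ∈ xs := by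
  induction xs using List.reverseRecOn generalizing y with
  | nil => simp [pvFmin] at h
  | append_singleton xs x ih =>
    rw [pvFmin_append] at h
    cases hm : pvFmin k xs <;> rw [hm] at h
    · injection h with h; subst h; simp
    · rename_i z
      have hz := ih hm
      change (if k x < k z then some x else some z) = some y at h
      by_cases hlt : k x < k z
      · rw [if_pos hlt] at h; injection h with h; subst h; simp
      · rw [if_neg hlt] at h; injection h with h; subst h
        exact List.mem_append_left _ hz

theorem pvFmin_eq_sorted_head {α : Type} (k : α → Int) (xs : List α) :
    pvFmin k xs = (PySem.List.sorted xs k false).head? := by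
  induction xs using List.reverseRecOn with
  | nil => rfl
  | append_singleton xs x ih =>
    rw [pvFmin_append, PySem.List.sorted_eq_foldl_insertBy, List.foldl_append,
        ← PySem.List.sorted_eq_foldl_insertBy]
    simp only [List.foldl_cons, List.foldl_nil]
    cases hs : PySem.List.sorted xs k false with
    | nil =>
      rw [hs] at ih; rw [ih]
      simp [PySem.List.insertBy]
    | cons h t =>
      rw [hs] at ih; rw [ih]
      by_cases hlt : k x < k h
      · simp [PySem.List.insertBy, hlt]
      · simp [PySem.List.insertBy, hlt]

theorem pvSel_eq_filter_fmin {α : Type} (m : α → Bool) (r : α → Int) (xs : List α) :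
    pvSelW (fun x => ((if m x then (0:Int) else 1), r x)) xs =
      if xs.filter m = [] then pvFmin r xs else pvFmin r (xs.filter m) := by
  induction xs using List.reverseRecOn with
  | nil => simp [pvSelW, pvFmin]
  | append_singleton xs x ih =>
    rw [pvSelW_append, ih, List.filter_append]
    by_cases hF : xs.filter m = []
    · have hall : ∀ y ∈ xs, m y = false := by simpa [List.filter_eq_nil_iff] using hF
      rw [if_pos hF, hF, List.nil_append]
      cases hxs : pvFmin r xs with
      | none =>
        have hxe : xs = [] := (pvFmin_eq_none_iff r xs).mp hxs
        subst hxe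
        by_cases hx : m x <;> simp [pvFmin, hx]
      | some y =>
        have hmy : m y = false := hall y (pvFmin_mem r xs hxs)
        by_cases hx : m x
        · have hfx : List.filter m [x] = [x] := by simp [hx]
          rw [hfx, if_neg (show ¬([x] = ([] : List α)) by simp)]
          simp [hx, hmy, pvKeyLt, pvFmin]
        · have hfx : List.filter m [x] = [] := by simp [hx]
          rw [hfx, if_pos (show ([] : List α) = [] from rfl), pvFmin_append, hxs]
          by_cases hlt : r x < r y <;> simp [hx, hmy, pvKeyLt, hlt]
    · have hne : ¬(List.filter m xs ++ List.filter m [x] = []) :=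
        fun h => hF (List.append_eq_nil_iff.mp h).1
      rw [if_neg hF, if_neg hne]
      cases hy : pvFmin r (xs.filter m) with
      | none => exact absurd ((pvFmin_eq_none_iff _ _).mp hy) hF
      | some y =>
        have hmy : m y = true := (List.mem_filter.mp (pvFmin_mem _ _ hy)).2
        by_cases hx : m x
        · have hfx : List.filter m [x] = [x] := by simp [hx]
          rw [hfx, pvFmin_append, hy]
          by_cases hlt : r x < r y <;> simp [hx, hmy, pvKeyLt, hlt]
        · have hfx : List.filter m [x] = [] := by simp [hx]
          rw [hfx, List.append_nil, hy]
          simp [hx, hmy, pvKeyLt]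

theorem pvFmin_map {α β : Type} (k : β → Int) (f : α → β) (xs : List α) :
    pvFmin k (xs.map f) = (pvFmin (fun x => k (f x)) xs).map f := by
  induction xs using List.reverseRecOn with
  | nil => rfl
  | append_singleton xs x ih =>
    rw [List.map_append, List.map_singleton, pvFmin_append, pvFmin_append, ih]
    cases pvFmin (fun x => k (f x)) xs with
    | none => rfl
    | some y =>
      by_cases hlt : k (f x) < k (f y) <;> simp [hlt]

theorem pvFmin_congr {α : Type} (k k' : α → Int) (xs : List α) (h : ∀ x ∈ xs, k x = k' x) :
    pvFmin k xs = pvFmin k' xs := by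
  induction xs using List.reverseRecOn with
  | nil => rfl
  | append_singleton xs x ih =>
    rw [pvFmin_append, pvFmin_append, ih (fun y hy => h y (List.mem_append_left _ hy))]
    cases hm : pvFmin k' xs with
    | none => rfl
    | some y =>
      have hy : y ∈ xs := pvFmin_mem k' xs hm
      change (if k x < k y then some x else some y) = (if k' x < k' y then some x else some y)
      rw [h x (by simp), h y (List.mem_append_left _ hy)]

-- B's fold over entry strings simulates a plain first-min selection over the strings
theorem pvStepB_sim (lf : List String) (tg : Option String) (es : List String) :
    ∀ b : Option String,
    es.foldl (pvStepB lf tg) (b.map (fun s => (pvKeyB lf tg s, pvMappedB lf s))) =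
      (es.foldl (fun b s => match b with
          | none => some s
          | some y => if pvKeyLt (pvKeyB lf tg s) (pvKeyB lf tg y) then some s else some y) b).map
        (fun s => (pvKeyB lf tg s, pvMappedB lf s)) := by
  induction es with
  | nil => intro b; rfl
  | cons s t ih =>
    intro b
    simp only [List.foldl_cons]
    cases b with
    | none => exact ih (some s)
    | some y =>
      by_cases hlt : pvKeyLt (pvKeyB lf tg s) (pvKeyB lf tg y) = true
      · have h1 : pvStepB lf tg (Option.map (fun s => (pvKeyB lf tg s, pvMappedB lf s)) (some y)) s
            = Option.map (fun s => (pvKeyB lf tg s, pvMappedB lf s)) (some s) := by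
          simp [pvStepB, hlt]
        rw [h1, show (match (some y : Option String) with
            | none => some s
            | some y => if pvKeyLt (pvKeyB lf tg s) (pvKeyB lf tg y) then some s else some y) = some s by simp [hlt]]
        exact ih (some s)
      · have h1 : pvStepB lf tg (Option.map (fun s => (pvKeyB lf tg s, pvMappedB lf s)) (some y)) s
            = Option.map (fun s => (pvKeyB lf tg s, pvMappedB lf s)) (some y) := by
          simp [pvStepB, hlt]
        rw [h1, show (match (some y : Option String) with
            | none => some s
            | some y => if pvKeyLt (pvKeyB lf tg s) (pvKeyB lf tg y) then some s else some y) = some y by simp [hlt]]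
        exact ih (some y)

theorem pvAlt_norm (lf : List String) (tg : Option String) (es : List String) :
    (es.foldl (pvStepB lf tg) none).map Prod.snd
      = (pvSelW (pvKeyB lf tg) es).map (pvMappedB lf) := by
  have h := pvStepB_sim lf tg es none
  simp only [Option.map_none] at h
  rw [h, Option.map_map]
  simp only [pvSelW]
  exact congrArg₂ Option.map (funext fun s => rfl)
    (congrArg (fun f => List.foldl f none es)
      (funext fun b => funext fun s => by cases b <;> rfl))

-- A's dict-building loop = insert-fold over the zipped (lowered field, stripped value) pairs

theorem getD_insert_fold (ps : List (String × String)) : ∀ (d : PySem.Dict String String) (k dflt : String),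
    ((ps.foldl (fun d p => d.insert p.1 p.2) d).getD k dflt)
      = ps.foldl (fun r p => if p.1 == k then p.2 else r) (d.getD k dflt) := by
  induction ps with
  | nil => intro d k dflt; rfl
  | cons p t ih =>
    intro d k dflt
    simp only [List.foldl_cons, ih, PySem.Dict.getD_insert]
    congr 1
    by_cases h : p.1 = k
    · simp [h]
    · simp [h, Ne.symm h]

theorem dictFoldA (values : List String) (fields : List String) : ∀ (s : Nat) (d : PySem.Dict String String),
    (PySem.List.enumerate values (s:Int)).foldl
      (fun d iv => if iv.1 < (fields.length : Int) then
          d.insert (PySem.Str.lower (PySem.List.pyGetD fields iv.1 "")) (PySem.Str.strip iv.2) else d) d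
    = (((fields.drop s).map PySem.Str.lower).zip (values.map PySem.Str.strip)).foldl
        (fun d p => d.insert p.1 p.2) d := by
  induction values with
  | nil => intro s d; simp [PySem.List.enumerate_nil]
  | cons v t ih =>
    intro s d
    rw [PySem.List.enumerate_cons]
    simp only [List.foldl_cons]
    by_cases h : s < fields.length
    · have h' : (s:Int) < (fields.length : Int) := by exact_mod_cast h
      rw [if_pos h']
      have hdrop : fields.drop s = fields[s] :: fields.drop (s+1) := List.drop_eq_getElem_cons h
      have : PySem.List.pyGetD fields (s:Int) "" = fields[s] := by
        rw [PySem.List.pyGetD_natCast, List.getD_eq_getElem _ _ h]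
      rw [this, hdrop]
      simp only [List.map_cons, List.zip_cons_cons, List.foldl_cons]
      exact ih (s+1) (d.insert (PySem.Str.lower fields[s]) (PySem.Str.strip v))
    · have h' : ¬ ((s:Int) < (fields.length : Int)) := by exact_mod_cast h
      rw [if_neg h']
      have hdrop : fields.drop s = [] := List.drop_eq_nil_of_le (by omega)
      have hdrop1 : fields.drop (s+1) = [] := List.drop_eq_nil_of_le (by omega)
      rw [show ((s:Int)+1) = (((s+1:Nat)):Int) by push_cast; ring, ih (s+1) d, hdrop, hdrop1]
      simp

theorem pvGetD_entryDictA (fields : List String) (entry_str : String) (k : String) :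
    (pvEntryDictA fields entry_str).getD k ""
      = pvLookupB (pvPairsB (fields.map PySem.Str.lower) entry_str) k := by
  show ((PySem.List.enumerate (pvSplit entry_str "|") ((0:Nat):Int)).foldl _ PySem.Dict.empty).getD k ""
      = _
  rw [dictFoldA (pvSplit entry_str "|") fields 0 PySem.Dict.empty, getD_insert_fold]
  simp [pvLookupB, pvPairsB, PySem.Dict.getD_empty]

theorem pvMappedA_eq_pvMappedB (fields : List String) (entry_str : String) :
    pvMappedA fields entry_str = pvMappedB (fields.map PySem.Str.lower) entry_str := by
  simp [pvMappedA, pvMappedB, pvGetD_entryDictA]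

theorem pvRank_eq (v : String) : pvImpactOrder.getD v 3 = pvRank v := by
  unfold pvImpactOrder pvRank
  by_cases h1 : v = "HIGH"
  · subst h1; decide
  by_cases h2 : v = "MODERATE"
  · subst h2; decide
  by_cases h3 : v = "LOW"
  · subst h3; decide
  · simp only [PySem.Dict.ofList, PySem.Dict.update, List.foldl_cons, List.foldl_nil]
    simp [PySem.Dict.getD_insert, PySem.Dict.getD_empty, h1, h2, h3]

-- the MANE/canonical scan never fires on A's fixed-key mapped dicts
theorem pvMane_none (lf : List String) (l : List String) :
    (l.map (pvMappedB lf)).find? (fun e =>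
        ((pvAGet? e "mane_select").getD "" != "") || (pvAGet? e "canonical" == some "YES")) = none := by
  rw [List.find?_map]
  have h : ((fun e => ((pvAGet? e "mane_select").getD "" != "")
      || (pvAGet? e "canonical" == some "YES")) ∘ pvMappedB lf) = fun _ => false := funext (fun s => rfl)
  rw [h]
  simp

theorem pvImpactKey_comp (lf : List String) (s : String) :
    pvImpactOrder.getD (pvAGetD (pvMappedB lf s) "impact" "MODIFIER") 3
      = pvRank (pvLookupB (pvPairsB lf s) "annotation_impact") := by
  rw [show pvAGetD (pvMappedB lf s) "impact" "MODIFIER"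
      = pvLookupB (pvPairsB lf s) "annotation_impact" from rfl, pvRank_eq]

-- the core: A's cascade equals the single keyed first-min, over any entry-string list
theorem pvCore (lf : List String) (gene : Option String) (es : List String) :
    pvPickBestA (es.map (pvMappedB lf)) gene
      = (pvSelW (pvKeyB lf (if gene.getD "" = "" then none
            else some (PySem.Str.upper (gene.getD "")))) es).map (pvMappedB lf) := by
  by_cases hg : gene.getD "" = ""
  · rw [if_pos hg]
    have hkey : pvSelW (pvKeyB lf none) es
        = pvSelW (fun s => ((if (fun (_ : String) => true) s then (0:Int) else 1),
            pvRank (pvLookupB (pvPairsB lf s) "annotation_impact"))) es := rfl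
    rw [hkey, pvSel_eq_filter_fmin]
    cases es with
    | nil => rfl
    | cons s0 t =>
      rw [List.filter_true, if_neg (by simp)]
      simp only [pvPickBestA]
      rw [if_neg (by simp), if_pos hg, pvMane_none lf (s0 :: t)]
      rw [← pvFmin_eq_sorted_head]
      simp only [pvFmin_map]
      rw [show pvFmin (fun s => pvImpactOrder.getD (pvAGetD (pvMappedB lf s) "impact" "MODIFIER") 3) (s0 :: t)
          = pvFmin (fun s => pvRank (pvLookupB (pvPairsB lf s) "annotation_impact")) (s0 :: t)
          from pvFmin_congr _ _ _ (fun s _ => pvImpactKey_comp lf s)]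
  · rw [if_neg hg]
    have hkey : pvSelW (pvKeyB lf (some (PySem.Str.upper (gene.getD "")))) es
        = pvSelW (fun s => ((if (PySem.Str.upper (pvLookupB (pvPairsB lf s) "gene_name")
              == PySem.Str.upper (gene.getD "")) then (0:Int) else 1),
            pvRank (pvLookupB (pvPairsB lf s) "annotation_impact"))) es := rfl
    rw [hkey, pvSel_eq_filter_fmin]
    cases es with
    | nil => rfl
    | cons s0 t =>
      simp only [pvPickBestA]
      rw [if_neg (by simp), if_neg hg]
      rw [show List.filter (fun e => PySem.Str.upper (pvAGetD e "gene" "") == PySem.Str.upper (gene.getD ""))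
            ((s0 :: t).map (pvMappedB lf))
          = ((s0 :: t).filter (fun s => PySem.Str.upper (pvLookupB (pvPairsB lf s) "gene_name")
              == PySem.Str.upper (gene.getD ""))).map (pvMappedB lf)
          from List.filter_map]
      by_cases hf : (s0 :: t).filter (fun s => PySem.Str.upper (pvLookupB (pvPairsB lf s) "gene_name")
          == PySem.Str.upper (gene.getD "")) = []
      · rw [if_pos hf, hf]
        rw [if_pos (show (([] : List String).map (pvMappedB lf)) = [] from rfl)]
        rw [pvMane_none lf (s0 :: t), ← pvFmin_eq_sorted_head]
        simp only [pvFmin_map]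
        rw [show pvFmin (fun s => pvImpactOrder.getD (pvAGetD (pvMappedB lf s) "impact" "MODIFIER") 3) (s0 :: t)
            = pvFmin (fun s => pvRank (pvLookupB (pvPairsB lf s) "annotation_impact")) (s0 :: t)
            from pvFmin_congr _ _ _ (fun s _ => pvImpactKey_comp lf s)]
      · rw [if_neg hf]
        rw [if_neg (by simpa using hf)]
        rw [pvMane_none lf _, ← pvFmin_eq_sorted_head]
        simp only [pvFmin_map]
        rw [show pvFmin (fun s => pvImpactOrder.getD (pvAGetD (pvMappedB lf s) "impact" "MODIFIER") 3)
              ((s0 :: t).filter (fun s => PySem.Str.upper (pvLookupB (pvPairsB lf s) "gene_name")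
                == PySem.Str.upper (gene.getD "")))
            = pvFmin (fun s => pvRank (pvLookupB (pvPairsB lf s) "annotation_impact"))
              ((s0 :: t).filter (fun s => PySem.Str.upper (pvLookupB (pvPairsB lf s) "gene_name")
                == PySem.Str.upper (gene.getD "")))
            from pvFmin_congr _ _ _ (fun s _ => pvImpactKey_comp lf s)]

-- ===== VERDICT (by name: the statement is the Claim_ definition above) =====
theorem parse_ann_value_spec : Claim_equal_parse_ann_value := by
  intro ann_string fields gene _
  show parse_ann_value ann_string fields gene = parse_ann_value_alt ann_string fields gene
  unfold parse_ann_value parse_ann_value_alt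
  simp only []
  rw [PySem.List.foldl_append_singleton_eq_map, List.nil_append,
      List.map_congr_left (fun s _ => pvMappedA_eq_pvMappedB fields s),
      pvAlt_norm, pvCore]
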